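-- pv_equiv track=rewrite | github.com/dmipatriot/espn_sidepots | app/scoring.py | _slot_allows
-- ===== SOURCE A (Python) =====
-- from typing import Any, Dict, Iterable, List, Sequence
--
-- def _slot_allows(slot: str, eligible_slots: Sequence[str]) -> bool:
--     if slot in eligible_slots:
--         return True
--     if "/" in slot:
--         allowed = set(part.strip() for part in slot.split("/") if part)
--         return any(part in eligible_slots for part in allowed)
--     if slot == "OP":
--         return any(pos in eligible_slots for pos in {"QB", "RB", "WR", "TE", "TQB"})
--     if slot == "ER":
--         return any(pos in eligible_slots for pos in {"RB", "WR", "TE"})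
--     return False
-- ===== SOURCE B (Python) =====
-- # Inverted lookup: which flex slots accept a given position.
-- _ACCEPTED_BY = {
--     "QB": ["OP"],
--     "RB": ["OP", "ER"],
--     "WR": ["OP", "ER"],
--     "TE": ["OP", "ER"],
--     "TQB": ["OP"],
-- }
--
--
-- def _slot_allows(slot, eligible_slots):
--     # Single pass over eligible_slots: test each eligible position against slot.
--     has_slash = "/" in slot
--     parts = [p.strip() for p in slot.split("/") if p] if has_slash else []
--     for e in eligible_slots:
--         if e == slot:
--             return True
--         if slot in _ACCEPTED_BY.get(e, []):
--             return True
--         if has_slash and e in parts: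
--             return True
--     return False
-- ===== Notes on version B (the rewrite author's own statement) =====
-- stated objective: alternative
-- what changed: Inverts the traversal: instead of A's building candidate expansions from the slot and scanning eligible_slots once per candidate, B makes a single pass over eligible_slots and tests each eligible position against the slot via an inverted acceptance table (position -> flex slots that accept it) plus a precomputed slash-part list.
import Mathlib
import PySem

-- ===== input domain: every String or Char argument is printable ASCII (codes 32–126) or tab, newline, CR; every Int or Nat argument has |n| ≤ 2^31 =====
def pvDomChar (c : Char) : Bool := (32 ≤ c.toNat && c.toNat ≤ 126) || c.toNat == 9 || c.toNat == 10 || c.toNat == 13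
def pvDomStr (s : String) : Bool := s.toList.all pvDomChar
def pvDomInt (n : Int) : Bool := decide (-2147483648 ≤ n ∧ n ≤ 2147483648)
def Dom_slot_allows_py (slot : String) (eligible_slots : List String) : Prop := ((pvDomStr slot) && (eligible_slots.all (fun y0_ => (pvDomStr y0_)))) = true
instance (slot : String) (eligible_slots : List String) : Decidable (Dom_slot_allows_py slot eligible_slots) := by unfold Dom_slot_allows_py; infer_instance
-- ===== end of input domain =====

-- B inverts the traversal: one pass over eligible_slots, testing each eligible position against the slot
-- via an inverted acceptance table, instead of A's candidate expansions each scanned against eligible_slots.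

-- ===== PORT A =====
def slot_allows_py (slot : String) (eligible_slots : List String) : Bool :=
  if eligible_slots.contains slot then true
  else if PySem.Str.isIn "/" slot then
    -- allowed = set(part.strip() for part in slot.split("/") if part)
    let allowed : PySem.Set String :=
      PySem.Set.ofList ((((PySem.Chars.splitOn slot.toList ['/']).filter (fun part => !(part == []))).map PySem.Chars.strip).map String.ofList)
    allowed.any (fun part => eligible_slots.contains part)
  else if slot == "OP" then
    (PySem.Set.ofList ["QB", "RB", "WR", "TE", "TQB"]).any (fun pos => eligible_slots.contains pos)
  else if slot == "ER" then
    (PySem.Set.ofList ["RB", "WR", "TE"]).any (fun pos => eligible_slots.contains pos)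
  else false

-- ===== PORT B =====
def pvAcceptedBy : PySem.Dict String (List String) :=
  PySem.Dict.ofList [("QB", ["OP"]), ("RB", ["OP", "ER"]), ("WR", ["OP", "ER"]), ("TE", ["OP", "ER"]), ("TQB", ["OP"])]

-- one pass over eligible_slots (the Python for-loop with early return = List.any)
def slot_allows_py_alt (slot : String) (eligible_slots : List String) : Bool :=
  let has_slash : Bool := PySem.Str.isIn "/" slot
  let parts : List String :=
    if has_slash then
      (((PySem.Chars.splitOn slot.toList ['/']).filter (fun part => !(part == []))).map PySem.Chars.strip).map String.ofList
    else []
  eligible_slots.any (fun e =>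
    if e == slot then true
    else if (pvAcceptedBy.getD e []).contains slot then true
    else if has_slash && parts.contains e then true
    else false)

-- ===== PRECONDITION & SPEC =====
def Spec_slot_allows_py (slot : String) (eligible_slots : List String) (out : Bool) : Prop := out = slot_allows_py_alt slot eligible_slots
instance (slot : String) (eligible_slots : List String) (out : Bool) : Decidable (Spec_slot_allows_py slot eligible_slots out) := by unfold Spec_slot_allows_py; infer_instance

-- ===== CLAIM (what is proved, stated in full; the proofs are below) =====
def Claim_equal_slot_allows_py : Prop := ∀ (slot : String) (eligible_slots : List String), Dom_slot_allows_py slot eligible_slots → Spec_slot_allows_py slot eligible_slots (slot_allows_py slot eligible_slots)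

-- ===== LEMMAS AND PROOFS =====

-- the stripped non-empty '/'-parts of the slot (as both ports compute them)
def partsOf (slot : String) : List String :=
  (((PySem.Chars.splitOn slot.toList ['/']).filter (fun part => !(part == []))).map PySem.Chars.strip).map String.ofList

theorem and_ite_contains (s : Bool) (P : List String) (e : String) :
    (s && (if s = true then P else ([] : List String)).contains e) = (s && P.contains e) := by
  cases s <;> simp

theorem pvIteOr (a b c : Bool) :
    (if a = true then true else if b = true then true else if c = true then true else false)
      = (a || (b || c)) := by
  cases a <;> cases b <;> cases c <;> simp

theorem bool_shuffle : ∀ a b c A B C s : Bool,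
    ((a || (b || (s && c))) || (A || (B || (s && C))))
      = ((a || A) || ((b || B) || (s && (c || C)))) := by decide

theorem bool_shuffle2 : ∀ a b c d C D : Bool,
    (((a && c) || (b && d)) || ((a && C) || (b && D)))
      = ((a && (c || C)) || (b && (d || D))) := by decide

theorem any_beq (slot : String) (el : List String) :
    el.any (fun e => e == slot) = el.contains slot := by
  rw [Bool.eq_iff_iff]
  simp [List.any_eq_true]

-- any over a Python set built from a list equals any over the list (depends on membership only)
theorem any_ofList_eq {α : Type} [BEq α] [LawfulBEq α] (xs : List α) (p : α → Bool) :
    (PySem.Set.ofList xs).any p = xs.any p := by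
  rw [Bool.eq_iff_iff]
  simp [List.any_eq_true, PySem.Set.mem_ofList]

-- cross-scan commutation: scanning xs for a member of ys = scanning ys for a member of xs
theorem any_contains_comm {α : Type} [BEq α] [LawfulBEq α] (xs ys : List α) :
    xs.any (fun x => ys.contains x) = ys.any (fun y => xs.contains y) := by
  rw [Bool.eq_iff_iff]
  simp only [List.any_eq_true, List.contains_iff_mem]
  exact ⟨fun ⟨x, hx, hy⟩ => ⟨x, hy, hx⟩, fun ⟨x, hx, hy⟩ => ⟨x, hy, hx⟩⟩

-- characterization of the inverted table lookup: slot ∈ acceptedBy[e] ↔ (slot, e) is an OP/ER expansion pair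
theorem mem_acceptedBy (e slot : String) :
    (pvAcceptedBy.getD e []).contains slot
      = (((slot == "OP") && (["QB", "RB", "WR", "TE", "TQB"] : List String).contains e)
          || ((slot == "ER") && (["RB", "WR", "TE"] : List String).contains e)) := by
  rw [Bool.eq_iff_iff]
  simp only [List.contains_iff_mem, Bool.or_eq_true, Bool.and_eq_true, beq_iff_eq]
  by_cases h1 : e = "QB"
  · subst h1; rw [show pvAcceptedBy.getD "QB" [] = ["OP"] from by decide]; simp
  · by_cases h2 : e = "RB"
    · subst h2; rw [show pvAcceptedBy.getD "RB" [] = ["OP", "ER"] from by decide]; simp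
    · by_cases h3 : e = "WR"
      · subst h3; rw [show pvAcceptedBy.getD "WR" [] = ["OP", "ER"] from by decide]; simp
      · by_cases h4 : e = "TE"
        · subst h4; rw [show pvAcceptedBy.getD "TE" [] = ["OP", "ER"] from by decide]; simp
        · by_cases h5 : e = "TQB"
          · subst h5; rw [show pvAcceptedBy.getD "TQB" [] = ["OP"] from by decide]; simp
          · have hd : pvAcceptedBy.getD e [] = [] := by
              have f1 : ("QB" == e) = false := by simp [Ne.symm h1]
              have f2 : ("RB" == e) = false := by simp [Ne.symm h2]
              have f3 : ("WR" == e) = false := by simp [Ne.symm h3]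
              have f4 : ("TE" == e) = false := by simp [Ne.symm h4]
              have f5 : ("TQB" == e) = false := by simp [Ne.symm h5]
              have hit : pvAcceptedBy.items =
                  [("QB", ["OP"]), ("RB", ["OP", "ER"]), ("WR", ["OP", "ER"]), ("TE", ["OP", "ER"]), ("TQB", ["OP"])] := by decide
              simp [PySem.Dict.getD, PySem.Dict.get?, hit, List.find?, f1, f2, f3, f4, f5]
            rw [hd]; simp [h1, h2, h3, h4, h5]

-- B's single pass over eligible_slots, flattened into three separate scans
theorem alt_flatten (slot : String) (el : List String) :
    slot_allows_py_alt slot el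
      = ((el.any (fun e => e == slot))
          || ((el.any (fun e => (pvAcceptedBy.getD e []).contains slot))
              || ((PySem.Str.isIn "/" slot) && (el.any (fun e => (partsOf slot).contains e))))) := by
  induction el with
  | nil => simp [slot_allows_py_alt]
  | cons x xs ih =>
    simp only [slot_allows_py_alt, partsOf, List.any_cons, and_ite_contains] at ih ⊢
    rw [pvIteOr, ih]
    exact bool_shuffle _ _ _ _ _ _ _

-- the inverted-table scan over eligible_slots, re-expressed by which slot fires it
theorem anyAcc (slot : String) (el : List String) :
    el.any (fun e => (pvAcceptedBy.getD e []).contains slot)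
      = (((slot == "OP") && (el.any (fun e => (["QB", "RB", "WR", "TE", "TQB"] : List String).contains e)))
          || ((slot == "ER") && (el.any (fun e => (["RB", "WR", "TE"] : List String).contains e)))) := by
  induction el with
  | nil => simp
  | cons x xs ih =>
    simp only [List.any_cons]
    rw [mem_acceptedBy, ih]
    exact bool_shuffle2 _ _ _ _ _ _

theorem slash_ne_OP_ER {slot : String} (h : PySem.Str.isIn "/" slot = true) :
    slot ≠ "OP" ∧ slot ≠ "ER" := by
  constructor <;> rintro rfl <;> revert h <;> decide

-- ===== VERDICT (by name: the statement is the Claim_ definition above) =====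
theorem slot_allows_py_spec : Claim_equal_slot_allows_py := by
  intro slot el _
  unfold Spec_slot_allows_py
  rw [alt_flatten, any_beq, anyAcc]
  simp only [slot_allows_py]
  by_cases hmem : el.contains slot = true
  · rw [if_pos hmem, hmem, Bool.true_or]
  · have hm : el.contains slot = false := by simpa using hmem
    rw [if_neg hmem, hm, Bool.false_or]
    by_cases hsl : PySem.Str.isIn "/" slot = true
    · obtain ⟨hop, her⟩ := slash_ne_OP_ER hsl
      have hOP : (slot == "OP") = false := by simp [hop]
      have hER : (slot == "ER") = false := by simp [her]
      rw [if_pos hsl, hsl, Bool.true_and, hOP, hER, Bool.false_and, Bool.false_and,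
        Bool.or_self, Bool.false_or]
      simp only [partsOf]
      rw [any_ofList_eq, any_contains_comm]
    · have hsl' : PySem.Str.isIn "/" slot = false := by simpa using hsl
      rw [if_neg hsl, hsl', Bool.false_and, Bool.or_false]
      by_cases hop : slot = "OP"
      · subst hop
        rw [if_pos (by decide : (("OP" : String) == "OP") = true),
          (by decide : (("OP" : String) == "OP") = true),
          (by decide : (("OP" : String) == "ER") = false),
          Bool.true_and, Bool.false_and, Bool.or_false, any_ofList_eq, any_contains_comm]
      · have hOP : (slot == "OP") = false := by simp [hop]
        rw [if_neg (by simp [hop] : ¬ (slot == "OP") = true), hOP, Bool.false_and, Bool.false_or]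
        by_cases her : slot = "ER"
        · subst her
          rw [if_pos (by decide : (("ER" : String) == "ER") = true),
            (by decide : (("ER" : String) == "ER") = true),
            Bool.true_and, any_ofList_eq, any_contains_comm]
        · have hER : (slot == "ER") = false := by simp [her]
          rw [if_neg (by simp [her] : ¬ (slot == "ER") = true), hER, Bool.false_and]
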